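-- pv_equiv track=rewrite | github.com/kmagusiak/latex-base | script/latex-base-clone.py | read_make_files_all
-- ===== SOURCE A (Python) =====
-- def read_make_files_all(fp, prefix):
-- 	"""
-- 	Reads files from a Makefile file prefixed by a variable name.
-- 	Returns a tuple with: (files, lines_before, lines_after)
-- 	"""
-- 	reading = 0
-- 	lines_before = []
-- 	lines_after = []
-- 	files = []
-- 	for line in fp:
-- 		if reading == 1:
-- 			pass
-- 		elif line.startswith(prefix):
-- 			line = line[len(prefix):]
-- 			reading = 1
-- 		else:
-- 			if reading == 0:
-- 				lines_before.append(line)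
-- 			else:
-- 				lines_after.append(line)
-- 			continue
-- 		line = line.rstrip()
-- 		cont = False
-- 		if line[-1:] == "\\":
-- 			cont = True
-- 			line = line.rstrip("\\")
-- 		fn = ''
-- 		for e in line.split():
-- 			fn += e
-- 			if fn[-1:] == "\\":
-- 				fn = fn[:len(fn) - 1] + ' '
-- 			else:
-- 				files.append(fn)
-- 				fn = ''
-- 		if not cont:
-- 			reading = 2
-- 	return (files, lines_before, lines_after)
-- ===== SOURCE B (Python) =====
-- def _continues(line):
--     return line.rstrip().endswith("\\")
--
--
-- def _split_before(lines, prefix):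
--     for i, l in enumerate(lines):
--         if l.startswith(prefix):
--             return lines[:i], lines[i:]
--     return lines, []
--
--
-- def _take_block(cur, rest):
--     block = [cur]
--     k = 0
--     while _continues(block[-1]) and k < len(rest):
--         block.append(rest[k])
--         k += 1
--     return block, rest[k:]
--
--
-- def _emit(pieces):
--     if not pieces:
--         return []
--     first, rest = pieces[0], pieces[1:]
--     if first.endswith("\\"):
--         if not rest:
--             return []
--         return _emit([first[:-1] + ' ' + rest[0]] + rest[1:])
--     return [first] + _emit(rest)
--
--
-- def _tokens(raw):
--     line = raw.rstrip()
--     if line.endswith("\\"):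
--         line = line.rstrip("\\")
--     return _emit(line.split())
--
--
-- def read_make_files_all(fp, prefix):
--     """Staged: slice the lines into before / variable blocks / after with
--     list-splitting helpers, then tokenize the collected block lines."""
--     lines = list(fp)
--     before, rest = _split_before(lines, prefix)
--     blocks, after = [], []
--     while rest:
--         block, rest = _take_block(rest[0][len(prefix):], rest[1:])
--         blocks += block
--         mid, rest = _split_before(rest, prefix)
--         after += mid
--     files = []
--     for raw in blocks:
--         files += _tokens(raw)
--     return (files, before, after)
-- ===== Notes on version B (the rewrite author's own statement) =====
-- stated objective: alternative
-- what changed: B replaces A's single fused state-machine fold (which tokenizes while scanning) by staged list splitting: slicing helpers cut the lines into before / variable blocks / after, and a separate recursive tokenizer merges backslash-escaped split() pieces of the collected block lines.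
import Mathlib
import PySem

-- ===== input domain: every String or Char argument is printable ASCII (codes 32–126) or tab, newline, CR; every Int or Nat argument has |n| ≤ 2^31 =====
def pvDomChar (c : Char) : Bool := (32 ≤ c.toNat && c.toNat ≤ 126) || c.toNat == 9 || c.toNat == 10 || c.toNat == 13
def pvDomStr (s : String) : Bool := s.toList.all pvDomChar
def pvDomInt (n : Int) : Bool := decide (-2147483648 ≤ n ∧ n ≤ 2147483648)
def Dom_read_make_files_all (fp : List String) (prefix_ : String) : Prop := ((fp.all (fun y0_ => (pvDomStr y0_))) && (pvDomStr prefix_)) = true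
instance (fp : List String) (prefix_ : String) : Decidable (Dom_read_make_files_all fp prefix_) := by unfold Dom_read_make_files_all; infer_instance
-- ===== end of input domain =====

-- B re-implements A's fused state-machine loop as staged list splitting (before / blocks / after) plus a recursive tokenizer; same cost, same return value.

-- hand port of Python's s.rstrip("\\") (PySem has no rstrip-with-chars): exact — removes ALL trailing '\' characters
def pyRstripBackslash (cs : List Char) : List Char := (cs.reverse.dropWhile (· == '\\')).reverse

-- ===== PORT A =====
-- body of A's inner 'for e in line.split()' loop
def pvA_tokStep (st : List String × List Char) (e : List Char) : List String × List Char :=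
  let fn := st.2 ++ e
  if PySem.Chars.slice fn (some (-1)) none = ['\\'] then            -- fn[-1:] == "\\"
    (st.1, PySem.Chars.slice fn none (some ((fn.length : Int) - 1)) ++ [' '])  -- fn[:len(fn)-1] + ' '
  else
    (st.1 ++ [String.ofList fn], [])

-- A's per-line block processing (after prefix handling): rstrip, cont detection, token loop
def pvA_line (files : List String) (l0 : List Char) : List String × Bool :=
  let l1 := PySem.Chars.rstrip l0
  let cont := PySem.Chars.slice l1 (some (-1)) none = ['\\']        -- line[-1:] == "\\"
  let l := if cont then pyRstripBackslash l1 else l1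
  let r := (PySem.Chars.split₀ l).foldl pvA_tokStep (files, [])
  (r.1, if cont then true else false)

-- one iteration of A's 'for line in fp' loop; state = (reading, lines_before, lines_after, files)
def pvA_step (prefix_ : String) (st : Int × List String × List String × List String)
    (line : String) : Int × List String × List String × List String :=
  let (reading, before, after, files) := st
  if reading == 1 then
    let r := pvA_line files line.toList
    (if r.2 then 1 else 2, before, after, r.1)
  else if PySem.Str.startswith line prefix_ then
    let r := pvA_line files (PySem.Chars.slice line.toList (some (PySem.Str.len prefix_)) none)
    (if r.2 then 1 else 2, before, after, r.1)
  else if reading == 0 then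
    (reading, before ++ [line], after, files)
  else
    (reading, before, after ++ [line], files)

def read_make_files_all (fp : List String) (prefix_ : String) :
    List String × List String × List String :=
  let st := fp.foldl (pvA_step prefix_) (0, [], [], [])
  (st.2.2.2, st.2.1, st.2.2.1)

-- ===== PORT B =====
def pvB_continues (l : List Char) : Bool :=
  PySem.Chars.endswith (PySem.Chars.rstrip l) ['\\']

-- B's _split_before: lines up to the first prefix line, and the remainder from it
def pvB_splitBefore (prefix_ : String) : List String → List String × List String
  | [] => ([], [])
  | l :: t =>
    if PySem.Str.startswith l prefix_ then ([], l :: t)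
    else
      let r := pvB_splitBefore prefix_ t
      (l :: r.1, r.2)

-- B's _take_block: the block line cur plus following lines while continuation holds
def pvB_takeBlock : List Char → List String → List (List Char) × List String
  | cur, [] => ([cur], [])
  | cur, l :: t =>
    if pvB_continues cur then
      let r := pvB_takeBlock l.toList t
      (cur :: r.1, r.2)
    else ([cur], l :: t)

-- B's _emit: recursively merge backslash-escaped split() pieces into filenames
def pvB_emit : List (List Char) → List String
  | [] => []
  | first :: rest =>
    if PySem.Chars.endswith first ['\\'] then
      match rest with
      | [] => []
      | r0 :: rs => pvB_emit ((first.dropLast ++ [' '] ++ r0) :: rs)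
    else String.ofList first :: pvB_emit rest
termination_by l => l.length
decreasing_by all_goals simp

-- B's _tokens
def pvB_tokens (raw : List Char) : List String :=
  let l1 := PySem.Chars.rstrip raw
  let l := if PySem.Chars.endswith l1 ['\\'] then pyRstripBackslash l1 else l1
  pvB_emit (PySem.Chars.split₀ l)

-- B's while loop over the remaining lines (fuel = number of lines, enough since each round consumes ≥ 1 line); returns (block lines, after lines)
def pvB_loop (prefix_ : String) : Nat → List String → List (List Char) × List String
  | 0, _ => ([], [])
  | _, [] => ([], [])
  | fuel + 1, l :: t =>
    let head := PySem.Chars.slice l.toList (some (PySem.Str.len prefix_)) none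
    let tb := pvB_takeBlock head t
    let sb := pvB_splitBefore prefix_ tb.2
    let r := pvB_loop prefix_ fuel sb.2
    (tb.1 ++ r.1, sb.1 ++ r.2)

def read_make_files_all_alt (fp : List String) (prefix_ : String) :
    List String × List String × List String :=
  let sb := pvB_splitBefore prefix_ fp
  let r := pvB_loop prefix_ fp.length sb.2
  (r.1.foldl (fun acc raw => acc ++ pvB_tokens raw) [], sb.1, r.2)

-- ===== PRECONDITION & SPEC =====
def Spec_read_make_files_all (fp : List String) (prefix_ : String) (out : List String × List String × List String) : Prop := out = read_make_files_all_alt fp prefix_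
instance (fp : List String) (prefix_ : String) (out : List String × List String × List String) : Decidable (Spec_read_make_files_all fp prefix_ out) := by unfold Spec_read_make_files_all; infer_instance

-- ===== CLAIM (what is proved, stated in full; the proofs are below) =====
def Claim_equal_read_make_files_all : Prop := ∀ (fp : List String) (prefix_ : String), Dom_read_make_files_all fp prefix_ → Spec_read_make_files_all fp prefix_ (read_make_files_all fp prefix_)

-- ===== LEMMAS AND PROOFS =====

-- B's phase-2 fold, named for the proofs
def pvTok (blk : List (List Char)) : List String :=
  blk.foldl (fun acc raw => acc ++ pvB_tokens raw) []

lemma pvTok_append (blk blk' : List (List Char)) :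
    pvTok (blk ++ blk') = pvTok blk ++ pvTok blk' := by
  unfold pvTok
  rw [PySem.List.foldl_append_eq_flatMap, PySem.List.foldl_append_eq_flatMap,
    PySem.List.foldl_append_eq_flatMap]
  simp

lemma pvTok_cons (x : List Char) (blk : List (List Char)) :
    pvTok (x :: blk) = pvB_tokens x ++ pvTok blk := by
  have h := pvTok_append [x] blk
  simp [pvTok] at h
  simp [pvTok, h]

-- Python's l[-1:] == "\\" is exactly l.endswith("\\")
lemma slice_last_iff (l : List Char) :
    PySem.List.slice l (some (-1)) none = ['\\'] ↔ PySem.Chars.endswith l ['\\'] = true := by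
  induction l using List.reverseRecOn with
  | nil => simp [PySem.Chars.endswith_iff, PySem.List.slice_from_neg_one]
  | append_singleton xs c _ =>
    rw [PySem.List.slice_from_neg_one, PySem.Chars.endswith_iff]
    simp only [List.length_append, List.length_singleton, Nat.add_sub_cancel, List.drop_left,
      List.cons.injEq, and_true]
    constructor
    · rintro rfl; exact List.suffix_append xs ['\\']
    · rintro ⟨t, ht⟩
      simpa using (congrArg List.getLast? ht).symm

-- Python's fn[:len(fn)-1] is fn.dropLast
lemma slice_dropLast (fn : List Char) :
    PySem.List.slice fn none (some ((fn.length : Int) - 1)) = fn.dropLast := by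
  rcases fn with _ | ⟨a, t⟩
  · simp [PySem.List.slice_to_neg_one]
  · have h : ((a :: t).length : Int) - 1 = (((a :: t).length - 1 : Nat) : Int) := by
      simp
    rw [h, PySem.List.slice_to_natCast, List.dropLast_eq_take]

-- A's token fold (started with empty fn) is B's recursive _emit
lemma emit_eq : ∀ (n : Nat) (es : List (List Char)), es.length ≤ n → ∀ (F : List String),
    (es.foldl pvA_tokStep (F, ([] : List Char))).1 = F ++ pvB_emit es := by
  intro n
  induction n with
  | zero =>
    intro es hes F
    have : es = [] := List.eq_nil_of_length_eq_zero (Nat.le_zero.mp hes)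
    subst this; simp [pvB_emit]
  | succ n ih =>
    intro es hes F
    match es with
    | [] => simp [pvB_emit]
    | e :: t =>
      simp only [List.foldl_cons]
      by_cases h : PySem.Chars.endswith e ['\\'] = true
      · have hstep : pvA_tokStep (F, ([] : List Char)) e = (F, e.dropLast ++ [' ']) := by
          unfold pvA_tokStep
          simp only [List.nil_append, PySem.Chars.slice_eq_listSlice]
          rw [if_pos ((slice_last_iff e).mpr h), slice_dropLast]
        rw [hstep]
        match t with
        | [] =>
          rw [pvB_emit.eq_def]
          simp [h]
        | t0 :: ts =>
          have hstep2 : ∀ (x : List Char),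
              List.foldl pvA_tokStep (F, e.dropLast ++ [' ']) (x :: ts) =
              List.foldl pvA_tokStep (F, ([] : List Char)) ((e.dropLast ++ [' '] ++ x) :: ts) := by
            intro x
            simp only [List.foldl_cons]
            have : pvA_tokStep (F, e.dropLast ++ [' ']) x =
                pvA_tokStep (F, ([] : List Char)) (e.dropLast ++ [' '] ++ x) := by
              simp [pvA_tokStep, List.append_assoc]
            rw [this]
          rw [hstep2 t0]
          have hlen : ((e.dropLast ++ [' '] ++ t0) :: ts).length ≤ n := by
            simp only [List.length_cons] at hes ⊢; omega
          rw [ih _ hlen F]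
          conv_rhs => rw [pvB_emit.eq_def]
          simp [h]
      · have hstep : pvA_tokStep (F, ([] : List Char)) e = (F ++ [String.ofList e], []) := by
          unfold pvA_tokStep
          simp only [List.nil_append, PySem.Chars.slice_eq_listSlice]
          rw [if_neg (fun hc => h ((slice_last_iff e).mp hc))]
        rw [hstep]
        have hlen : t.length ≤ n := by simp only [List.length_cons] at hes; omega
        rw [ih _ hlen]
        conv_rhs => rw [pvB_emit.eq_def]
        simp [h]

-- A's per-line processing = B's tokenizer plus B's continuation test
lemma line_eq (F : List String) (l : List Char) :
    pvA_line F l = (F ++ pvB_tokens l, pvB_continues l) := by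
  have hiff := slice_last_iff (PySem.Chars.rstrip l)
  unfold pvA_line pvB_tokens pvB_continues
  by_cases h : PySem.Chars.endswith (PySem.Chars.rstrip l) ['\\'] = true
  · simp only [PySem.Chars.slice_eq_listSlice, hiff, h, if_pos]
    rw [emit_eq (PySem.Chars.split₀ (pyRstripBackslash (PySem.Chars.rstrip l))).length _ le_rfl]
  · simp only [PySem.Chars.slice_eq_listSlice, hiff, h, if_neg, Bool.false_eq_true, not_false_eq_true]
    rw [emit_eq (PySem.Chars.split₀ (PySem.Chars.rstrip l)).length _ le_rfl]

-- takeBlock's block always starts with cur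
lemma takeBlock_head (cur : List Char) (rest : List String) :
    (pvB_takeBlock cur rest).1 = cur :: (pvB_takeBlock cur rest).1.tail := by
  cases rest with
  | nil => simp [pvB_takeBlock]
  | cons l t =>
    unfold pvB_takeBlock
    split <;> simp

-- takeBlock on a non-continuing cur stops at once
lemma takeBlock_stop (cur : List Char) (rest : List String) (h : pvB_continues cur = false) :
    pvB_takeBlock cur rest = ([cur], rest) := by
  cases rest <;> simp [pvB_takeBlock, h]

-- the main staged-run lemma: A's fold from state 2 (scan-for-next-prefix) and from
-- state "just processed cur" agree with B's splitters/loop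
lemma pvRun (prefix_ : String) : ∀ (n : Nat) (rest : List String), rest.length ≤ n →
    ((∀ (f : Nat), rest.length ≤ f → ∀ (b a fi : List String),
       ∃ rd : Int, rest.foldl (pvA_step prefix_) (2, b, a, fi) =
         (rd, b,
          a ++ (pvB_splitBefore prefix_ rest).1 ++
            (pvB_loop prefix_ f (pvB_splitBefore prefix_ rest).2).2,
          fi ++ pvTok (pvB_loop prefix_ f (pvB_splitBefore prefix_ rest).2).1)) ∧
     (∀ (f : Nat), rest.length ≤ f → ∀ (cur : List Char) (b a fi : List String),
       ∃ rd : Int, rest.foldl (pvA_step prefix_) ((if pvB_continues cur then 1 else 2), b, a, fi) =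
         (rd, b,
          a ++ (pvB_splitBefore prefix_ (pvB_takeBlock cur rest).2).1 ++
            (pvB_loop prefix_ f (pvB_splitBefore prefix_ (pvB_takeBlock cur rest).2).2).2,
          fi ++ pvTok (pvB_takeBlock cur rest).1.tail ++
            pvTok (pvB_loop prefix_ f (pvB_splitBefore prefix_ (pvB_takeBlock cur rest).2).2).1))) := by
  intro n
  induction n with
  | zero =>
    intro rest hr
    have hnil : rest = [] := List.eq_nil_of_length_eq_zero (by omega)
    subst hnil
    constructor
    · intro f _ b a fi
      exact ⟨2, by cases f <;> simp [pvB_splitBefore, pvB_loop, pvTok]⟩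
    · intro f _ cur b a fi
      refine ⟨if pvB_continues cur then 1 else 2, ?_⟩
      cases f <;> simp [pvB_splitBefore, pvB_takeBlock, pvB_loop, pvTok]
  | succ n ih =>
    intro rest hr
    have hP : ∀ (f : Nat), rest.length ≤ f → ∀ (b a fi : List String),
        ∃ rd : Int, rest.foldl (pvA_step prefix_) (2, b, a, fi) =
          (rd, b,
           a ++ (pvB_splitBefore prefix_ rest).1 ++
             (pvB_loop prefix_ f (pvB_splitBefore prefix_ rest).2).2,
           fi ++ pvTok (pvB_loop prefix_ f (pvB_splitBefore prefix_ rest).2).1) := by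
      intro f hf b a fi
      cases rest with
      | nil => exact ⟨2, by cases f <;> simp [pvB_splitBefore, pvB_loop, pvTok]⟩
      | cons l t =>
        simp only [List.length_cons] at hr hf
        by_cases hs : PySem.Chars.startswith l.toList prefix_.toList = true
        · obtain ⟨f', rfl⟩ : ∃ f', f = f' + 1 := ⟨f - 1, by omega⟩
          rw [List.foldl_cons]
          have hstep : pvA_step prefix_ (2, b, a, fi) l =
              ((if pvB_continues (PySem.Chars.slice l.toList (some (PySem.Str.len prefix_)) none)
                  then (1 : Int) else 2), b, a,
               fi ++ pvB_tokens (PySem.Chars.slice l.toList (some (PySem.Str.len prefix_)) none)) := by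
            simp [pvA_step, hs, line_eq]
          rw [hstep]
          obtain ⟨rd, hq⟩ := (ih t (by omega)).2 f' (by omega)
            (PySem.Chars.slice l.toList (some (PySem.Str.len prefix_)) none) b a
            (fi ++ pvB_tokens (PySem.Chars.slice l.toList (some (PySem.Str.len prefix_)) none))
          refine ⟨rd, ?_⟩
          rw [hq]
          have hsb : pvB_splitBefore prefix_ (l :: t) = ([], l :: t) := by
            simp [pvB_splitBefore, hs]
          rw [hsb]
          simp only [pvB_loop]
          rw [pvTok_append,
            takeBlock_head (PySem.Chars.slice l.toList (some (PySem.Str.len prefix_)) none) t,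
            pvTok_cons]
          simp [List.append_assoc]
        · rw [List.foldl_cons]
          have hstep : pvA_step prefix_ (2, b, a, fi) l = (2, b, a ++ [l], fi) := by
            simp [pvA_step, hs]
          rw [hstep]
          obtain ⟨rd, hq⟩ := (ih t (by omega)).1 f (by omega) b (a ++ [l]) fi
          refine ⟨rd, ?_⟩
          rw [hq]
          have hsb : pvB_splitBefore prefix_ (l :: t) =
              (l :: (pvB_splitBefore prefix_ t).1, (pvB_splitBefore prefix_ t).2) := by
            simp [pvB_splitBefore, hs]
          rw [hsb]
          simp [List.append_assoc]
    refine ⟨hP, ?_⟩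
    intro f hf cur b a fi
    by_cases hc : pvB_continues cur = true
    · cases rest with
      | nil =>
        refine ⟨if pvB_continues cur then 1 else 2, ?_⟩
        cases f <;> simp [pvB_splitBefore, pvB_takeBlock, pvB_loop, pvTok]
      | cons l t =>
        simp only [List.length_cons] at hr hf
        rw [if_pos hc, List.foldl_cons]
        have hstep : pvA_step prefix_ (1, b, a, fi) l =
            ((if pvB_continues l.toList then (1 : Int) else 2), b, a,
             fi ++ pvB_tokens l.toList) := by
          simp [pvA_step, line_eq]
        rw [hstep]
        obtain ⟨rd, hq⟩ := (ih t (by omega)).2 f (by omega) l.toList b a (fi ++ pvB_tokens l.toList)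
        refine ⟨rd, ?_⟩
        rw [hq]
        have htb : pvB_takeBlock cur (l :: t) =
            (cur :: (pvB_takeBlock l.toList t).1, (pvB_takeBlock l.toList t).2) := by
          simp [pvB_takeBlock, hc]
        rw [htb]
        simp only [List.tail_cons]
        rw [takeBlock_head l.toList t, pvTok_cons]
        simp [List.append_assoc]
    · have hc' : pvB_continues cur = false := Bool.eq_false_iff.mpr hc
      rw [if_neg (by simp [hc']), takeBlock_stop cur rest hc']
      obtain ⟨rd, hq⟩ := hP f hf b a fi
      exact ⟨rd, by rw [hq]; simp [pvTok]⟩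

-- A's fold from state 0 (initial scan into lines_before)
lemma pvRun0 (prefix_ : String) : ∀ (fp : List String) (f : Nat), fp.length ≤ f →
    ∀ (b a fi : List String),
    ∃ rd : Int, fp.foldl (pvA_step prefix_) (0, b, a, fi) =
      (rd, b ++ (pvB_splitBefore prefix_ fp).1,
       a ++ (pvB_loop prefix_ f (pvB_splitBefore prefix_ fp).2).2,
       fi ++ pvTok (pvB_loop prefix_ f (pvB_splitBefore prefix_ fp).2).1) := by
  intro fp
  induction fp with
  | nil =>
    intro f _ b a fi
    exact ⟨0, by cases f <;> simp [pvB_splitBefore, pvB_loop, pvTok]⟩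
  | cons l t ih =>
    intro f hf b a fi
    simp only [List.length_cons] at hf
    by_cases hs : PySem.Chars.startswith l.toList prefix_.toList = true
    · obtain ⟨f', rfl⟩ : ∃ f', f = f' + 1 := ⟨f - 1, by omega⟩
      rw [List.foldl_cons]
      have hstep : pvA_step prefix_ (0, b, a, fi) l =
          ((if pvB_continues (PySem.Chars.slice l.toList (some (PySem.Str.len prefix_)) none)
              then (1 : Int) else 2), b, a,
           fi ++ pvB_tokens (PySem.Chars.slice l.toList (some (PySem.Str.len prefix_)) none)) := by
        simp [pvA_step, hs, line_eq]
      rw [hstep]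
      obtain ⟨rd, hq⟩ := (pvRun prefix_ t.length t le_rfl).2 f' (by omega)
        (PySem.Chars.slice l.toList (some (PySem.Str.len prefix_)) none) b a
        (fi ++ pvB_tokens (PySem.Chars.slice l.toList (some (PySem.Str.len prefix_)) none))
      refine ⟨rd, ?_⟩
      rw [hq]
      have hsb : pvB_splitBefore prefix_ (l :: t) = ([], l :: t) := by
        simp [pvB_splitBefore, hs]
      rw [hsb]
      simp only [pvB_loop]
      rw [pvTok_append,
        takeBlock_head (PySem.Chars.slice l.toList (some (PySem.Str.len prefix_)) none) t,
        pvTok_cons]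
      simp [List.append_assoc]
    · rw [List.foldl_cons]
      have hstep : pvA_step prefix_ (0, b, a, fi) l = (0, b ++ [l], a, fi) := by
        simp [pvA_step, hs]
      rw [hstep]
      obtain ⟨rd, hq⟩ := ih f (by omega) (b ++ [l]) a fi
      refine ⟨rd, ?_⟩
      rw [hq]
      have hsb : pvB_splitBefore prefix_ (l :: t) =
          (l :: (pvB_splitBefore prefix_ t).1, (pvB_splitBefore prefix_ t).2) := by
        simp [pvB_splitBefore, hs]
      rw [hsb]
      simp [List.append_assoc]

-- ===== VERDICT (by name: the statement is the Claim_ definition above) =====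
theorem read_make_files_all_spec : Claim_equal_read_make_files_all := by
  intro fp prefix_ _
  unfold Spec_read_make_files_all read_make_files_all read_make_files_all_alt
  obtain ⟨rd, h⟩ := pvRun0 prefix_ fp fp.length le_rfl [] [] []
  rw [h]
  simp [pvTok]
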